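-- pv_equiv track=rewrite | github.com/daniel-reich/ubiquitous-fiesta | rbeuWab36FAiLj65m_15.py | grouping
-- ===== SOURCE A (Python) =====
-- def grouping(w):
--   group = {}
--   for word in w:
--     n = sum(c.isupper() for c in word)
--     if n not in group:
--       group[n] = []
--     group[n].append(word)
--   return {k:sorted(v, key = lexi) for k,v in group.items()}
--
-- def lexi(w):
--   return [ord(c) for c in w.lower()]
-- ===== SOURCE B (Python) =====
-- def lexi(w):
--     return [ord(c) for c in w.lower()]
--
-- def grouping(w):
--     def ups(word):
--         return sum(1 for c in word if c.isupper())
--     keys = list(dict.fromkeys(ups(word) for word in w))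
--     return {k: sorted([x for x in w if ups(x) == k], key=lexi) for k in keys}
-- ===== Notes on version B (the rewrite author's own statement) =====
-- stated objective: alternative
-- what changed: B replaces A's single-pass mutable-bucket dict accumulation by a key-first decomposition: it collects the distinct uppercase-counts in first-occurrence order via dict.fromkeys and builds each group by filtering the word list per key, sorting with the same lexi key.
import Mathlib
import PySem

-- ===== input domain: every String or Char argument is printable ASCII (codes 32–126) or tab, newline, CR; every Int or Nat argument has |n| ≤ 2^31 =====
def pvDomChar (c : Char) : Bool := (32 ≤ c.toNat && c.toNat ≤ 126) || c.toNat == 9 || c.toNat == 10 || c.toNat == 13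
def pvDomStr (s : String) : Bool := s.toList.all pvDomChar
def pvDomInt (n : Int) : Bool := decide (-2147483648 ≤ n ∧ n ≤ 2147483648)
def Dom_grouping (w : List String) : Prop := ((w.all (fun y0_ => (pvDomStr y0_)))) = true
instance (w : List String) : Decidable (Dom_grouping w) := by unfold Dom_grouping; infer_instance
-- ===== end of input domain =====

-- B groups by first collecting the distinct uppercase-counts (dict.fromkeys) and filtering the
-- words per key, instead of accumulating mutable buckets in a dict during one scan: alternative
-- decomposition, same results.

-- ===== PORT A =====
-- helper lexi (shared by both Pythons: B reuses A's key function)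
def lexi (s : String) : List Int :=
  (PySem.Str.lower s).toList.map (fun c => (c.toNat : Int))

def grouping (w : List String) : List (Int × List String) :=
  let group := w.foldl (fun d word =>
    let n : Int := (word.toList.map (fun c => if PySem.Chars.isupper c then (1 : Int) else 0)).sum
    let d' := if d.contains n then d else d.insert n ([] : List String)
    d'.insert n (d'.getD n [] ++ [word])) PySem.Dict.empty
  group.items.map (fun kv => (kv.1, PySem.List.sorted kv.2 lexi false))

-- ===== PORT B =====
def ups (word : String) : Int :=
  ((word.toList.countP (fun c => PySem.Chars.isupper c) : Nat) : Int)

def grouping_alt (w : List String) : List (Int × List String) :=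
  let keys := PySem.List.dedup (w.map ups)
  keys.map (fun k => (k, PySem.List.sorted (w.filter (fun x => ups x == k)) lexi false))

-- ===== PRECONDITION & SPEC =====
def Spec_grouping (w : List String) (out : List (Int × List String)) : Prop := out = grouping_alt w
instance (w : List String) (out : List (Int × List String)) : Decidable (Spec_grouping w out) := by unfold Spec_grouping; infer_instance

-- ===== CLAIM (what is proved, stated in full; the proofs are below) =====
def Claim_equal_grouping : Prop := ∀ (w : List String), Dom_grouping w → Spec_grouping w (grouping w)

-- ===== LEMMAS AND PROOFS =====

-- A's loop body is exactly a dict "modify (ups word) [] (append word)" step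
theorem stepA_eq_modify (d : PySem.Dict Int (List String)) (word : String) :
    (let n : Int := (word.toList.map (fun c => if PySem.Chars.isupper c then (1 : Int) else 0)).sum
     let d' := if d.contains n then d else d.insert n ([] : List String)
     d'.insert n (d'.getD n [] ++ [word]))
    = d.modify (ups word) [] (fun v => v ++ [word]) := by
  have hn : (word.toList.map (fun c => if PySem.Chars.isupper c then (1 : Int) else 0)).sum = ups word := by
    simpa [ups] using PySem.List.sum_map_ite_one_zero (fun c => PySem.Chars.isupper c) word.toList
  simp only [hn, PySem.Dict.modify]
  by_cases h : d.contains (ups word)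
  · simp [h]
  · simp [eq_false_of_ne_true h, PySem.Dict.insert_insert_self,
      PySem.Dict.getD_of_not_contains d ([] : List String) (eq_false_of_ne_true h)]

theorem groupDict_eq (w : List String) :
    w.foldl (fun d word =>
      let n : Int := (word.toList.map (fun c => if PySem.Chars.isupper c then (1 : Int) else 0)).sum
      let d' := if d.contains n then d else d.insert n ([] : List String)
      d'.insert n (d'.getD n [] ++ [word])) PySem.Dict.empty
    = w.foldl (fun d word => d.modify (ups word) [] (fun v => v ++ [word])) PySem.Dict.empty := by
  exact List.foldl_ext _ _ _ (fun d word _ => stepA_eq_modify d word)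

-- the bucket at key k is the filter of w by uppercase count k
theorem bucket_eq (w : List String) (k : Int) :
    (w.foldl (fun d word => d.modify (ups word) [] (fun v => v ++ [word])) PySem.Dict.empty).getD k []
    = w.filter (fun x => ups x == k) := by
  have h := PySem.Dict.getD_foldl_modify_append
    (w.map (fun x => (ups x, x))) (PySem.Dict.empty : PySem.Dict Int (List String)) k
  rw [List.foldl_map] at h
  simpa [List.filter_map, Function.comp_def] using h

-- ===== VERDICT (by name: the statement is the Claim_ definition above) =====
theorem grouping_spec : Claim_equal_grouping := by
  intro w _
  simp only [Spec_grouping, grouping, grouping_alt]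
  rw [groupDict_eq w]
  set g := w.foldl (fun d word => d.modify (ups word) [] (fun v => v ++ [word])) PySem.Dict.empty with hg
  have hnd : g.keys.Nodup := by
    rw [hg]
    exact PySem.Dict.nodup_keys_foldl_modify_key w ups [] (fun d x v => v ++ [x]) PySem.Dict.empty (by simp [PySem.Dict.keys_empty])
  have hkeys : g.keys = PySem.List.dedup (w.map ups) := by
    rw [hg, PySem.Dict.keys_foldl_modify_key w ups [] (fun d x v => v ++ [x]) PySem.Dict.empty,
      PySem.Dict.keys_empty, PySem.List.dedup_eq_ofList]
    rfl
  rw [PySem.Dict.items_eq_map_keys g hnd ([] : List String), hkeys, List.map_map]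
  apply List.map_congr_left
  intro k _
  simp only [Function.comp_apply]
  rw [hg, bucket_eq w k]
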